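-- pv_equiv track=rewrite | github.com/lcalvo80/BoeTracker | app/services/openai_service.py | _merge_impacto_objs
-- ===== SOURCE A (Python) =====
-- from typing import Dict, Any, Tuple, List, Optional
--
-- _EMPTY_IMPACTO: Dict[str, Any] = {
--     "afectados": [],
--     "cambios_operativos": [],
--     "riesgos_potenciales": [],
--     "beneficios_previstos": [],
--     "recomendaciones": [],
-- }
--
-- def _ensure_impacto_shape(obj: Dict[str, Any]) -> Dict[str, Any]:
--     out = dict(_EMPTY_IMPACTO)
--     if isinstance(obj, dict):
--         out["afectados"] = [str(x).strip() for x in obj.get("afectados", []) if str(x).strip()]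
--         out["cambios_operativos"] = [str(x).strip() for x in obj.get("cambios_operativos", []) if str(x).strip()]
--         out["riesgos_potenciales"] = [str(x).strip() for x in obj.get("riesgos_potenciales", []) if str(x).strip()]
--         out["beneficios_previstos"] = [str(x).strip() for x in obj.get("beneficios_previstos", []) if str(x).strip()]
--         out["recomendaciones"] = [str(x).strip() for x in obj.get("recomendaciones", []) if str(x).strip()]
--     return out
--
-- def _uniq_keep_order(seq: List[str], limit: Optional[int] = None) -> List[str]:
--     seen = set()
--     out: List[str] = []
--     for x in seq:
--         s = str(x).strip()
--         if not s or s in seen: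
--             continue
--         seen.add(s)
--         out.append(s)
--         if limit and len(out) >= limit:
--             break
--     return out
--
-- def _merge_impacto_objs(parts: List[Dict[str, Any]]) -> Dict[str, Any]:
--     if not parts:
--         return dict(_EMPTY_IMPACTO)
--
--     keys = ["afectados", "cambios_operativos", "riesgos_potenciales", "beneficios_previstos", "recomendaciones"]
--     agg: Dict[str, List[str]] = {k: [] for k in keys}
--
--     for p in parts:
--         p = _ensure_impacto_shape(p)
--         for k in keys:
--             agg[k].extend(p.get(k, []) or [])
--
--     merged = {k: _uniq_keep_order(v, limit=20) for k, v in agg.items()}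
--     return _ensure_impacto_shape(merged)
-- ===== SOURCE B (Python) =====
-- from typing import Dict, Any, List
--
-- def _merge_impacto_objs(parts: List[Dict[str, Any]]) -> Dict[str, Any]:
--     keys = ["afectados", "cambios_operativos", "riesgos_potenciales", "beneficios_previstos", "recomendaciones"]
--     merged: Dict[str, Any] = {}
--     for k in keys:
--         out: List[str] = []
--         seen = set()
--         for p in parts:
--             vals = p.get(k, []) if isinstance(p, dict) else []
--             for x in vals:
--                 if len(out) >= 20:
--                     break
--                 s = str(x).strip()
--                 if s and s not in seen:
--                     seen.add(s)
--                     out.append(s)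
--         merged[k] = out
--     return merged
-- ===== Notes on version B (the rewrite author's own statement) =====
-- stated objective: alternative
-- what changed: B replaces A's three passes (shape-clean each part, aggregate all values per key into a buffer, then deduplicate/cap and re-clean) with a key-major single pass that dedups and caps incrementally with a per-key seen set, with no aggregate buffer and no re-cleaning pass.
import Mathlib
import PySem

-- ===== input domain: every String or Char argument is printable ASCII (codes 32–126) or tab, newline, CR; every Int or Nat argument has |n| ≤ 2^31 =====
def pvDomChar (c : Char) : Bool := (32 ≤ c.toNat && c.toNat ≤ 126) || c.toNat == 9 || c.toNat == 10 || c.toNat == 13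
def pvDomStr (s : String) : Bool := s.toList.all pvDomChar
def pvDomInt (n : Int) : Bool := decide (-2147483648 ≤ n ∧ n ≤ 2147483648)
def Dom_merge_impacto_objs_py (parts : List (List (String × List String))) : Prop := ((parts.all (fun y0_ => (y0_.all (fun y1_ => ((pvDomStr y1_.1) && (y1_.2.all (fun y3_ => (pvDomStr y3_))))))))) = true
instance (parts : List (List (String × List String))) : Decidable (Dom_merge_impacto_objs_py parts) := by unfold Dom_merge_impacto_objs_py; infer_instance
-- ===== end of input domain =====

-- B fuses A's aggregate-all-then-deduplicate-then-reshape passes into one key-major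
-- incremental dedup with no aggregate buffer (objective: alternative decomposition).

-- ===== PORT A =====
-- keys list, shared by both ports (the same literal appears in _EMPTY_IMPACTO and in `keys`)
def pvKeys : List String := ["afectados", "cambios_operativos", "riesgos_potenciales", "beneficios_previstos", "recomendaciones"]

-- [str(x).strip() for x in xs if str(x).strip()]  (x is already a str here)
def pvCleanList (xs : List String) : List String :=
  xs.filterMap (fun x => let s := PySem.Str.strip x; if s = "" then none else some s)

-- _ensure_impacto_shape: out = dict(_EMPTY_IMPACTO), then the five assignments in order
-- (obj is always a dict at this type, so the isinstance branch is taken)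
def ensure_impacto_shape (obj : List (String × List String)) : List (String × List String) :=
  pvKeys.map (fun k => (k, pvCleanList (PySem.Dict.getD ⟨obj⟩ k [])))

-- _uniq_keep_order's loop: seen/out accumulators, `if limit and len(out) >= limit: break`
def uniq_keep_order_go (seq : List String) (seen : PySem.Set String) (out : List String) (limit : Option Int) : List String :=
  match seq with
  | [] => out
  | x :: rest =>
    let s := PySem.Str.strip x
    if s = "" ∨ PySem.Set.contains seen s = true then
      uniq_keep_order_go rest seen out limit
    else
      let seen' := PySem.Set.add seen s
      let out' := out ++ [s]
      match limit with
      | some l => if l ≠ 0 ∧ (out'.length : Int) ≥ l then out' else uniq_keep_order_go rest seen' out' limit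
      | none => uniq_keep_order_go rest seen' out' limit

def uniq_keep_order (seq : List String) (limit : Option Int) : List String :=
  uniq_keep_order_go seq (PySem.Set.ofList []) [] limit

def merge_impacto_objs_py (parts : List (List (String × List String))) : List (String × List String) :=
  if parts = [] then pvKeys.map (fun k => (k, ([] : List String)))  -- dict(_EMPTY_IMPACTO)
  else
    let agg : PySem.Dict String (List String) :=
      parts.foldl (fun agg p =>
        let p' := ensure_impacto_shape p
        pvKeys.foldl (fun agg k =>
          -- agg[k].extend(p.get(k, []) or [])   ('or []' is the identity on list values)
          PySem.Dict.modify agg k [] (fun v => v ++ PySem.Dict.getD ⟨p'⟩ k []))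
          agg)
        ⟨pvKeys.map (fun k => (k, ([] : List String)))⟩
    let merged := agg.items.map (fun kv => (kv.1, uniq_keep_order kv.2 (some 20)))
    ensure_impacto_shape merged

-- ===== PORT B =====
-- inner loop over one part's values for one key: cap check, strip, dedup-append
def pvBInner (xs : List String) (out : List String) (seen : PySem.Set String) : List String × PySem.Set String :=
  match xs with
  | [] => (out, seen)
  | x :: rest =>
    if 20 ≤ out.length then (out, seen)  -- break
    else
      let s := PySem.Str.strip x
      if s ≠ "" ∧ PySem.Set.contains seen s = false then
        pvBInner rest (out ++ [s]) (PySem.Set.add seen s)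
      else
        pvBInner rest out seen

def merge_impacto_objs_py_alt (parts : List (List (String × List String))) : List (String × List String) :=
  pvKeys.map (fun k =>
    (k, (parts.foldl (fun st p => pvBInner (PySem.Dict.getD ⟨p⟩ k []) st.1 st.2)
          (([] : List String), PySem.Set.ofList ([] : List String))).1))

-- ===== PRECONDITION & SPEC =====
def Spec_merge_impacto_objs_py (parts : List (List (String × List String))) (out : List (String × List String)) : Prop := out = merge_impacto_objs_py_alt parts
instance (parts : List (List (String × List String))) (out : List (String × List String)) : Decidable (Spec_merge_impacto_objs_py parts out) := by unfold Spec_merge_impacto_objs_py; infer_instance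

-- ===== CLAIM (what is proved, stated in full; the proofs are below) =====
def Claim_equal_merge_impacto_objs_py : Prop := ∀ (parts : List (List (String × List String))), Dom_merge_impacto_objs_py parts → Spec_merge_impacto_objs_py parts (merge_impacto_objs_py parts)

-- ===== LEMMAS AND PROOFS =====
-- strip is idempotent
lemma pv_dropWhile_fixed_of_prefix (p : Char → Bool) {t l : List Char} (ht : t <+: l)
    (hl : List.dropWhile p l = l) : List.dropWhile p t = t := by
  cases t with
  | nil => simp
  | cons a t' =>
    obtain ⟨r, rfl⟩ := ht
    rw [List.cons_append] at hl
    rw [List.dropWhile_cons] at hl ⊢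
    by_cases hp : p a = true
    · simp [hp] at hl ⊢
      have := congrArg List.length hl
      have hle := (List.dropWhile_sublist (l := t' ++ r) (p := p)).length_le
      simp [List.length_append] at this hle
      omega
    · simp [hp]

lemma pv_chars_strip_strip (cs : List Char) :
    PySem.Chars.strip (PySem.Chars.strip cs) = PySem.Chars.strip cs := by
  unfold PySem.Chars.strip PySem.Chars.rstrip PySem.Chars.lstrip
  set sp := PySem.Chars.isspace
  set l := List.dropWhile sp cs with hl
  have hfix : List.dropWhile sp l = l := List.dropWhile_idempotent sp cs
  have hpre : (List.dropWhile sp l.reverse).reverse <+: l := by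
    have hsuf : List.dropWhile sp l.reverse <:+ l.reverse := List.dropWhile_suffix sp
    have := hsuf.reverse
    simpa using this
  rw [pv_dropWhile_fixed_of_prefix sp hpre hfix]
  simp [List.dropWhile_idempotent]

lemma pv_strip_strip (s : String) : PySem.Str.strip (PySem.Str.strip s) = PySem.Str.strip s := by
  have h := pv_chars_strip_strip s.toList
  apply String.toList_injective
  simp [PySem.Str.toList_strip, h]

lemma pvBInner_cap (xs out : List String) (seen : PySem.Set String) (h : 20 ≤ out.length) :
    pvBInner xs out seen = (out, seen) := by
  cases xs with
  | nil => rfl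
  | cons x rest => unfold pvBInner; simp [h]

lemma pvFold_cap (ls : List (List String)) (out : List String) (seen : PySem.Set String)
    (h : 20 ≤ out.length) :
    (ls.foldl (fun st xs => pvBInner xs st.1 st.2) (out, seen)).1 = out := by
  induction ls generalizing seen with
  | nil => rfl
  | cons xs ls ih => simp [List.foldl_cons, pvBInner_cap _ _ _ h]; exact ih _

lemma pv_clean_fix (l : List String) (h : ∀ y ∈ l, PySem.Str.strip y = y ∧ y ≠ "") :
    pvCleanList l = l := by
  induction l with
  | nil => rfl
  | cons x l ih =>
    obtain ⟨h1, h2⟩ := h x (by simp)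
    simp only [pvCleanList, List.filterMap_cons]
    rw [show (let s := PySem.Str.strip x; if s = "" then none else some s) = some x by
      simp [h1, h2]]
    exact congrArg (x :: ·) (ih (fun y hy => h y (by simp [hy])))

lemma pv_uniq_inv (seq : List String) (seen : PySem.Set String) (out : List String)
    (lim : Option Int) (h : ∀ y ∈ out, PySem.Str.strip y = y ∧ y ≠ "") :
    ∀ y ∈ uniq_keep_order_go seq seen out lim, PySem.Str.strip y = y ∧ y ≠ "" := by
  induction seq generalizing seen out with
  | nil => simpa [uniq_keep_order_go] using h
  | cons x rest ih =>
    unfold uniq_keep_order_go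
    set s := PySem.Str.strip x with hs
    by_cases hcp : s = "" ∨ PySem.Set.contains seen s = true
    · rw [if_pos hcp]; exact ih seen out h
    · rw [if_neg hcp]
      have hne : s ≠ "" := fun h' => hcp (Or.inl h')
      have hmem : ∀ y ∈ out ++ [s], PySem.Str.strip y = y ∧ y ≠ "" := by
        intro y hy
        rcases List.mem_append.1 hy with hy | hy
        · exact h y hy
        · simp at hy; subst hy; exact ⟨by rw [hs]; exact pv_strip_strip x, hne⟩
      cases lim with
      | none => exact ih _ _ hmem
      | some l =>
        dsimp only
        by_cases hcap : l ≠ 0 ∧ ((out ++ [s]).length : Int) ≥ l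
        · rw [if_pos hcap]; exact hmem
        · rw [if_neg hcap]; exact ih _ _ hmem

lemma pv_fuse_one : ∀ (xs rest out : List String) (seen : PySem.Set String), out.length < 20 →
    uniq_keep_order_go (pvCleanList xs ++ rest) seen out (some 20) =
      (if 20 ≤ (pvBInner xs out seen).1.length then (pvBInner xs out seen).1
       else uniq_keep_order_go rest (pvBInner xs out seen).2 (pvBInner xs out seen).1 (some 20)) := by
  intro xs
  induction xs with
  | nil =>
    intro rest out seen h
    simp [pvCleanList, pvBInner, Nat.not_le.2 h]
  | cons x xs ih =>
    intro rest out seen h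
    have hcap : ¬ 20 ≤ out.length := Nat.not_le.2 h
    conv_rhs => rw [pvBInner]
    rw [if_neg hcap]
    dsimp only
    set s := PySem.Str.strip x with hs
    have hss : PySem.Str.strip s = s := by rw [hs]; exact pv_strip_strip x
    by_cases h1 : s = ""
    · have hcl : pvCleanList (x :: xs) = pvCleanList xs := by
        simp [pvCleanList, ← hs, h1]
      rw [hcl, if_neg (show ¬(s ≠ "" ∧ PySem.Set.contains seen s = false) from fun hc => hc.1 h1)]
      exact ih rest out seen h
    · have hcl : pvCleanList (x :: xs) = s :: pvCleanList xs := by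
        simp [pvCleanList, ← hs, h1]
      rw [hcl, List.cons_append]
      conv_lhs => rw [uniq_keep_order_go]
      dsimp only
      rw [hss]
      by_cases h2 : PySem.Set.contains seen s = true
      · rw [if_pos (Or.inr h2),
          if_neg (show ¬(s ≠ "" ∧ PySem.Set.contains seen s = false) from fun hc => by
            rw [h2] at hc; exact absurd hc.2 (by simp))]
        exact ih rest out seen h
      · rw [if_neg (show ¬(s = "" ∨ PySem.Set.contains seen s = true) from fun hc =>
            hc.elim h1 h2),
          if_pos (show s ≠ "" ∧ PySem.Set.contains seen s = false from
            ⟨h1, by simpa using h2⟩)]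
        by_cases h3 : out.length + 1 = 20
        · have hlim : (20 : Int) ≠ 0 ∧ ((out ++ [s]).length : Int) ≥ 20 := by
            constructor
            · norm_num
            · simp [List.length_append, h3]
          rw [if_pos hlim, pvBInner_cap xs (out ++ [s]) _ (by simp [h3])]
          rw [if_pos (by simp [h3])]
        · have hlim : ¬((20 : Int) ≠ 0 ∧ ((out ++ [s]).length : Int) ≥ 20) := by
            intro hc
            have := hc.2
            simp [List.length_append] at this
            omega
          rw [if_neg hlim]
          exact ih rest (out ++ [s]) (PySem.Set.add seen s) (by simp; omega)

lemma pv_fuse_all : ∀ (ls : List (List String)) (out : List String) (seen : PySem.Set String),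
    out.length < 20 →
    uniq_keep_order_go (ls.flatMap pvCleanList) seen out (some 20) =
      (ls.foldl (fun st xs => pvBInner xs st.1 st.2) (out, seen)).1 := by
  intro ls
  induction ls with
  | nil => intro out seen h; rfl
  | cons xs ls ih =>
    intro out seen h
    rw [List.flatMap_cons, pv_fuse_one xs _ out seen h, List.foldl_cons]
    by_cases hc : 20 ≤ (pvBInner xs out seen).1.length
    · rw [if_pos hc]
      have := pvFold_cap ls (pvBInner xs out seen).1 (pvBInner xs out seen).2 hc
      simpa using this.symm
    · rw [if_neg hc]
      have := ih (pvBInner xs out seen).1 (pvBInner xs out seen).2 (Nat.lt_of_not_le hc)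
      simpa using this

lemma pv_getD_keysMap (g : String → List String) (k : String) (hk : k ∈ pvKeys) :
    PySem.Dict.getD ⟨pvKeys.map (fun k' => (k', g k'))⟩ k [] = g k := by
  fin_cases hk <;> simp [pvKeys, PySem.Dict.getD, PySem.Dict.get?, List.find?]

lemma pv_step_eq (g h : String → List String) :
    pvKeys.foldl (fun agg k => PySem.Dict.modify agg k [] (fun v => v ++ h k))
      ⟨pvKeys.map (fun k => (k, g k))⟩
      = ⟨pvKeys.map (fun k => (k, g k ++ h k))⟩ := by
  simp [pvKeys, List.foldl, PySem.Dict.modify, PySem.Dict.insert, PySem.Dict.getD,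
    PySem.Dict.get?, PySem.Dict.contains, List.find?]

lemma pv_agg_fold : ∀ (parts : List (List (String × List String))) (g : String → List String),
    parts.foldl (fun agg p =>
        let p' := ensure_impacto_shape p
        pvKeys.foldl (fun agg k =>
          PySem.Dict.modify agg k [] (fun v => v ++ PySem.Dict.getD ⟨p'⟩ k [])) agg)
      ⟨pvKeys.map (fun k => (k, g k))⟩
    = ⟨pvKeys.map (fun k =>
        (k, g k ++ parts.flatMap (fun p => pvCleanList (PySem.Dict.getD ⟨p⟩ k []))))⟩ := by
  intro parts
  induction parts with
  | nil => intro g; simp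
  | cons p parts ih =>
    intro g
    rw [List.foldl_cons]
    dsimp only
    rw [pv_step_eq g (fun k => PySem.Dict.getD ⟨ensure_impacto_shape p⟩ k []), ih]
    congr 1
    apply List.map_congr_left
    intro k hk
    have hens : PySem.Dict.getD ⟨ensure_impacto_shape p⟩ k [] =
        pvCleanList (PySem.Dict.getD ⟨p⟩ k []) :=
      pv_getD_keysMap (fun k' => pvCleanList (PySem.Dict.getD ⟨p⟩ k' [])) k hk
    rw [List.flatMap_cons, hens, List.append_assoc]

-- ===== VERDICT (by name: the statement is the Claim_ definition above) =====
theorem merge_impacto_objs_py_spec : Claim_equal_merge_impacto_objs_py := by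
  intro parts _
  unfold Spec_merge_impacto_objs_py
  by_cases hp : parts = []
  · subst hp
    simp [merge_impacto_objs_py, merge_impacto_objs_py_alt]
  · unfold merge_impacto_objs_py
    rw [if_neg hp]
    dsimp only
    rw [pv_agg_fold parts (fun _ => [])]
    unfold merge_impacto_objs_py_alt ensure_impacto_shape
    rw [List.map_map]
    apply List.map_congr_left
    intro k hk
    simp only [Function.comp_def]
    rw [pv_getD_keysMap (fun k' => uniq_keep_order
        ([] ++ parts.flatMap (fun p => pvCleanList (PySem.Dict.getD ⟨p⟩ k' []))) (some 20)) k hk]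
    rw [List.nil_append]
    set L := parts.flatMap (fun p => pvCleanList (PySem.Dict.getD ⟨p⟩ k [])) with hL
    have hinv := pv_uniq_inv L (PySem.Set.ofList []) [] (some 20) (by simp)
    unfold uniq_keep_order
    rw [pv_clean_fix _ hinv]
    have hflat : L = (parts.map (fun p => PySem.Dict.getD ⟨p⟩ k [])).flatMap pvCleanList := by
      rw [List.flatMap_map]
    rw [hflat, pv_fuse_all _ [] (PySem.Set.ofList []) (by norm_num), List.foldl_map]
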